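-- pv_equiv track=rewrite | github.com/rappatoni/Knowledge-Representation | Basic Sudoku SAT Solver/sudoku_sat_solver.py | read_sudoku
-- ===== SOURCE A (Python) =====
-- def v(i, j, d):
--     return 81 * (i - 1) + 9 * (j - 1) + d
--
-- def read_sudoku(sudoku_as_line, clauses):
--     instance_clauses = clauses[:]
--
--     i = 1
--     j = 1
--     for character in sudoku_as_line:
--         if character == "\n":
--             break
--         d = int(character)
--         if d:
--             instance_clauses.append([v(i, j, d)])
--         j = j + 1
--         if j > 9:
--             i = i + 1
--             j = 1
--     return instance_clauses
-- ===== SOURCE B (Python) =====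
-- def _units(line, r):
--     if not line:
--         return []
--     head, tail = line[:9], line[9:]
--     row = [[81 * r + 9 * c + int(ch)] for c, ch in enumerate(head) if int(ch)]
--     return row + _units(tail, r + 1)
--
-- def read_sudoku(sudoku_as_line, clauses):
--     line = sudoku_as_line.split("\n", 1)[0]
--     return clauses + _units(line, 0)
-- ===== Notes on version B (the rewrite author's own statement) =====
-- stated objective: alternative
-- what changed: Replaces A's single stateful loop with running (i, j) counters and a j>9 reset branch by a recursive decomposition: the first line is split into 9-character row chunks, each row's unit clauses are built by a comprehension over the row, and the rows are concatenated onto a copy of clauses.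
import Mathlib
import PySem

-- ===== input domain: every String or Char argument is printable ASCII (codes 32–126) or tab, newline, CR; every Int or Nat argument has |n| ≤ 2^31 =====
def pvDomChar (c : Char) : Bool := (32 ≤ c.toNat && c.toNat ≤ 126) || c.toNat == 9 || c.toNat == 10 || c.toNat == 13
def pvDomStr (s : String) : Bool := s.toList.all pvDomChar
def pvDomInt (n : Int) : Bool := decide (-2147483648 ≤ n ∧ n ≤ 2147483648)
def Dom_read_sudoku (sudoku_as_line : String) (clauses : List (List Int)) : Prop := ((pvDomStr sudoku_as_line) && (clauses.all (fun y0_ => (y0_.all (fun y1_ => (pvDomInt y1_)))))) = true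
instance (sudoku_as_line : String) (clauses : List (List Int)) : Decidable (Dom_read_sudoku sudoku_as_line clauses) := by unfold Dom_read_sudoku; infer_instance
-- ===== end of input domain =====

-- B replaces A's single stateful loop (running i, j counters with a j>9 reset) by a
-- recursive row decomposition: split the first line into 9-character chunks and build
-- each row's unit clauses by a comprehension (objective: alternative decomposition).

-- ===== PORT A =====
-- helper v(i, j, d) from A's module
def pyV (i j d : Int) : Int := 81 * (i - 1) + 9 * (j - 1) + d

-- the per-character loop of A: state (i, j, instance_clauses); break on '\n'.
-- int(character): Pre_ guarantees a digit, so the ValueError case (none) is defaulted to 0 (unreached inside Pre_).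
def readLoopA : List Char → Int → Int → List (List Int) → List (List Int)
  | [], _, _, acc => acc
  | c :: rest, i, j, acc =>
    if c = '\n' then acc
    else
      let d := (PySem.Int.ofStr? (String.singleton c)).getD 0
      let acc' := if d ≠ 0 then acc ++ [[pyV i j d]] else acc
      let j' := j + 1
      if j' > 9 then readLoopA rest (i + 1) 1 acc'
      else readLoopA rest i j' acc'

def read_sudoku (sudoku_as_line : String) (clauses : List (List Int)) : List (List Int) :=
  readLoopA sudoku_as_line.toList 1 1 clauses

-- ===== PORT B =====
-- _units(line, r): if the line is empty return []; otherwise head, tail = line[:9], line[9:]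
-- (take 9 / drop 9, exact for these nonnegative slice bounds), the row's clauses by a
-- comprehension over enumerate(head), then row + _units(tail, r + 1).
def unitsB (line : List Char) (r : Int) : List (List Int) :=
  if line = [] then []
  else
    let head := line.take 9
    let tail := line.drop 9
    let row := (PySem.List.enumerate head).filterMap (fun q =>
      let d := (PySem.Int.ofStr? (String.singleton q.2)).getD 0
      if d ≠ 0 then some [81 * r + 9 * q.1 + d] else none)
    row ++ unitsB tail (r + 1)
termination_by line.length
decreasing_by
  rename_i h
  have : line.length ≠ 0 := fun hl => h (List.eq_nil_of_length_eq_zero hl)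
  simp [List.length_drop]; omega

-- line = sudoku_as_line.split("\n", 1)[0] is the prefix before the first newline;
-- return clauses + _units(line, 0).
def read_sudoku_alt (sudoku_as_line : String) (clauses : List (List Int)) : List (List Int) :=
  clauses ++ unitsB (sudoku_as_line.toList.takeWhile (· ≠ '\n')) 0

-- ===== PRECONDITION & SPEC =====
-- Pre_ excludes exactly the inputs on which A raises ValueError: a non-digit character
-- before the first newline (int(character) fails there); A returns on all other inputs.
def Pre_read_sudoku (sudoku_as_line : String) (clauses : List (List Int)) : Prop :=
  (sudoku_as_line.toList.takeWhile (· ≠ '\n')).all (fun c => c.isDigit) = true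
instance (sudoku_as_line : String) (clauses : List (List Int)) : Decidable (Pre_read_sudoku sudoku_as_line clauses) := by unfold Pre_read_sudoku; infer_instance
def pvWitness_read_sudoku : String × List (List Int) := ("1003\nxx", [[5], [-7]])
def Spec_read_sudoku (sudoku_as_line : String) (clauses : List (List Int)) (out : List (List Int)) : Prop := out = read_sudoku_alt sudoku_as_line clauses
instance (sudoku_as_line : String) (clauses : List (List Int)) (out : List (List Int)) : Decidable (Spec_read_sudoku sudoku_as_line clauses out) := by unfold Spec_read_sudoku; infer_instance

-- ===== CLAIM (what is proved, stated in full; the proofs are below) =====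
def Claim_equal_read_sudoku : Prop := ∀ (sudoku_as_line : String) (clauses : List (List Int)), Dom_read_sudoku sudoku_as_line clauses → Pre_read_sudoku sudoku_as_line clauses → Spec_read_sudoku sudoku_as_line clauses (read_sudoku sudoku_as_line clauses)

-- ===== LEMMAS AND PROOFS =====

-- A's loop never depends on the characters at and after the first '\n' (it breaks there),
-- so it may be run on the takeWhile prefix B extracts.
lemma readLoopA_takeWhile (cs : List Char) : ∀ (i j : Int) (acc : List (List Int)),
    readLoopA cs i j acc = readLoopA (cs.takeWhile (· ≠ '\n')) i j acc := by
  induction cs with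
  | nil => intro i j acc; rfl
  | cons c rest ih =>
    intro i j acc
    by_cases hc : c = '\n'
    · simp [readLoopA, hc, List.takeWhile]
    · have ht : (c :: rest).takeWhile (· ≠ '\n') = c :: rest.takeWhile (· ≠ '\n') := by
        simp [hc]
      rw [ht]
      simp only [readLoopA, hc, if_false]
      split <;> apply ih

-- proof-side reference shape: the unit clauses of a digit list, indexing its
-- characters by the flat running position k (row k/9, column k%9)
def unitsFlat : List Char → Nat → List (List Int)
  | [], _ => []
  | c :: rest, k =>
    let d := (PySem.Int.ofStr? (String.singleton c)).getD 0
    (if d ≠ 0 then [[81 * ((k / 9 : Nat) : Int) + 9 * ((k % 9 : Nat) : Int) + d]] else [])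
      ++ unitsFlat rest (k + 1)

-- A's loop with counters started at flat position k (i = k/9+1, j = k%9+1) appends
-- exactly unitsFlat.
lemma readLoopA_units (cs : List Char) : ∀ (k : Nat) (acc : List (List Int)),
    (cs.all (fun c => c.isDigit) = true) →
    readLoopA cs ((k / 9 : Nat) + 1) ((k % 9 : Nat) + 1) acc = acc ++ unitsFlat cs k := by
  induction cs with
  | nil => intro k acc _; simp [readLoopA, unitsFlat]
  | cons c rest ih =>
    intro k acc hall
    simp only [List.all_cons, Bool.and_eq_true] at hall
    obtain ⟨hc, hrest⟩ := hall
    have hnl : c ≠ '\n' := by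
      intro h; subst h; simp [Char.isDigit] at hc
    simp only [readLoopA, hnl, if_false]
    have hv : pyV ((k / 9 : Nat) + 1) ((k % 9 : Nat) + 1)
        ((PySem.Int.ofStr? (String.singleton c)).getD 0)
        = 81 * ((k / 9 : Nat) : Int) + 9 * ((k % 9 : Nat) : Int)
          + (PySem.Int.ofStr? (String.singleton c)).getD 0 := by
      unfold pyV; ring
    rw [hv]
    set d := (PySem.Int.ofStr? (String.singleton c)).getD 0 with hd
    set u : List (List Int) :=
      if d ≠ 0 then [[81 * ((k / 9 : Nat) : Int) + 9 * ((k % 9 : Nat) : Int) + d]] else []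
      with hu
    have hacc' : (if d ≠ 0 then acc ++ [[81 * ((k / 9 : Nat) : Int) + 9 * ((k % 9 : Nat) : Int) + d]] else acc)
        = acc ++ u := by
      rw [hu]; split <;> simp
    rw [hacc']
    have hun : unitsFlat (c :: rest) k = u ++ unitsFlat rest (k + 1) := by
      simp only [unitsFlat]; rfl
    rw [hun, ← List.append_assoc]
    by_cases h9 : k % 9 = 8
    · have hj : (((k % 9 : Nat) : Int) + 1 + 1 > 9) := by rw [h9]; norm_num
      rw [if_pos hj]
      have h1 : ((k + 1) / 9 : Nat) = k / 9 + 1 := by omega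
      have h2 : ((k + 1) % 9 : Nat) = 0 := by omega
      have := ih (k + 1) (acc ++ u) hrest
      rw [h1, h2] at this
      push_cast at this ⊢
      convert this using 2
    · have hj : ¬ (((k % 9 : Nat) : Int) + 1 + 1 > 9) := by
        have : k % 9 < 9 := Nat.mod_lt _ (by norm_num)
        have : k % 9 ≤ 7 := by omega
        push_cast; omega
      rw [if_neg hj]
      have h1 : ((k + 1) / 9 : Nat) = k / 9 := by omega
      have h2 : ((k + 1) % 9 : Nat) = k % 9 + 1 := by omega
      have := ih (k + 1) (acc ++ u) hrest
      rw [h1, h2] at this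
      push_cast at this ⊢
      convert this using 2

lemma unitsFlat_append (xs ys : List Char) : ∀ (k : Nat),
    unitsFlat (xs ++ ys) k = unitsFlat xs k ++ unitsFlat ys (k + xs.length) := by
  induction xs with
  | nil => intro k; simp [unitsFlat]
  | cons x xs ih =>
    intro k
    simp only [List.cons_append, unitsFlat, ih (k + 1), List.length_cons, List.append_assoc]
    ring_nf

-- one row: for a chunk of at most 9 characters starting at column c of row r, the
-- flat-index units are B's comprehension over enumerate with start c
lemma unitsFlat_row (xs : List Char) : ∀ (c r : Nat), c + xs.length ≤ 9 →
    unitsFlat xs (9 * r + c) =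
      (PySem.List.enumerate xs (c : Int)).filterMap (fun q =>
        let d := (PySem.Int.ofStr? (String.singleton q.2)).getD 0
        if d ≠ 0 then some [81 * (r : Int) + 9 * q.1 + d] else none) := by
  induction xs with
  | nil => intro c r _; simp [unitsFlat, PySem.List.enumerate_nil]
  | cons x xs ih =>
    intro c r hle
    simp only [List.length_cons] at hle
    have hc : c < 9 := by omega
    have h1 : (9 * r + c) / 9 = r := by omega
    have h2 : (9 * r + c) % 9 = c := by omega
    rw [PySem.List.enumerate_cons]
    simp only [unitsFlat, h1, h2, List.filterMap_cons]
    have hrec : 9 * r + c + 1 = 9 * r + (c + 1) := by omega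
    rw [hrec, ih (c + 1) r (by omega)]
    have hcast : ((c : Int) + 1) = ((c + 1 : Nat) : Int) := by push_cast; ring
    rw [hcast]
    split <;> simp

-- unfolding of unitsB on a nonempty list (proof-side)
lemma unitsB_cons (cs : List Char) (h : ¬ cs = []) (r : Int) :
    unitsB cs r =
      ((PySem.List.enumerate (cs.take 9)).filterMap (fun q =>
        let d := (PySem.Int.ofStr? (String.singleton q.2)).getD 0
        if d ≠ 0 then some [81 * r + 9 * q.1 + d] else none)) ++ unitsB (cs.drop 9) (r + 1) := by
  rw [unitsB, if_neg h]

lemma unitsB_nil (r : Int) : unitsB [] r = [] := by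
  rw [unitsB]; simp

-- B's recursive chunking computes the flat-index units
lemma unitsB_eq (n : Nat) : ∀ (cs : List Char), cs.length ≤ n → ∀ (r : Nat),
    unitsB cs (r : Int) = unitsFlat cs (9 * r) := by
  induction n with
  | zero =>
    intro cs hlen r
    have : cs = [] := List.eq_nil_of_length_eq_zero (by omega)
    subst this; simp [unitsB_nil, unitsFlat]
  | succ n ih =>
    intro cs hlen r
    by_cases hnil : cs = []
    · subst hnil; simp [unitsB_nil, unitsFlat]
    · rw [unitsB_cons cs hnil]
      have hsplit : cs = cs.take 9 ++ cs.drop 9 := (List.take_append_drop 9 cs).symm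
      conv_rhs => rw [hsplit]
      rw [unitsFlat_append]
      have hrow : unitsFlat (cs.take 9) (9 * r) =
          (PySem.List.enumerate (cs.take 9) 0).filterMap (fun q =>
            let d := (PySem.Int.ofStr? (String.singleton q.2)).getD 0
            if d ≠ 0 then some [81 * (r : Int) + 9 * q.1 + d] else none) := by
        simpa using unitsFlat_row (cs.take 9) 0 r (by simp)
      by_cases h9 : cs.length ≤ 9
      · have hd : cs.drop 9 = [] := List.drop_eq_nil_of_le h9
        rw [hd, unitsB_nil, hrow]
        simp [unitsFlat]
      · have hlen9 : (cs.take 9).length = 9 := by simp; omega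
        rw [hlen9]
        have harith : 9 * r + 9 = 9 * (r + 1) := by ring
        rw [harith]
        have hdl : (cs.drop 9).length ≤ n := by
          simp only [List.length_drop]; omega
        have hcast : ((r : Int) + 1) = ((r + 1 : Nat) : Int) := by push_cast; ring
        rw [hcast, ih (cs.drop 9) hdl (r + 1), hrow]

-- ===== VERDICT (by name: the statement is the Claim_ definition above) =====
theorem read_sudoku_spec : Claim_equal_read_sudoku := by
  intro s clauses _ hpre
  unfold Spec_read_sudoku read_sudoku read_sudoku_alt
  rw [readLoopA_takeWhile]
  have hA := readLoopA_units (s.toList.takeWhile (· ≠ '\n')) 0 clauses hpre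
  have hB := unitsB_eq (s.toList.takeWhile (· ≠ '\n')).length
      (s.toList.takeWhile (· ≠ '\n')) le_rfl 0
  simp only [Nat.mul_zero, Nat.cast_zero] at hB
  rw [hB]
  exact hA
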